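-- pv_equiv track=rewrite | github.com/jcabrero/nilcode | src/nilcode/agents/utils.py | determine_next_agent
-- ===== SOURCE A (Python) =====
-- from typing import Dict, List, Optional
--
-- AGENT_EXECUTION_ORDER: List[str] = [
--     "software_architect",
--     "coder",  # Handles all implementation including dependencies, frontend, backend
--     "tester",
-- ]
--
-- INTERNAL_AGENTS = ["planner", "orchestrator", "error_recovery", "a2a_client"] + AGENT_EXECUTION_ORDER
--
-- def determine_next_agent(
--     tasks: List[Dict[str, str]],
--     prefer_agent: Optional[str] = None,
-- ) -> str:
--     """
--     Determine which agent should execute next based on task assignments.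
--
--     Args:
--         tasks: List of task dictionaries with `assignedTo` and `status`.
--         prefer_agent: Optional agent name to prioritize when it still has work.
--
--     Returns:
--         Name of the next agent to execute. Defaults to `tester` when no pending
--         work is found so validation still runs before orchestrator.
--     """
--     pending_tasks = [
--         task for task in tasks
--         if task.get("status") in {"pending", "in_progress"}
--     ]
--
--     if prefer_agent and any(
--         task.get("assignedTo") == prefer_agent for task in pending_tasks
--     ):
--         return prefer_agent
--
--     # Check for internal agents in execution order FIRST
--     # This ensures proper sequential execution (architect -> coder -> tester)
--     for agent in AGENT_EXECUTION_ORDER: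
--         if any(task.get("assignedTo") == agent for task in pending_tasks):
--             return agent
--
--     # Then check for external A2A agents
--     # External agents are checked after internal agents to maintain workflow order
--     for task in pending_tasks:
--         assigned_to = task.get("assignedTo", "")
--         # If assigned to an agent that's not in our internal agents list, route to a2a_client
--         if assigned_to and assigned_to not in INTERNAL_AGENTS:
--             # This is an external agent - route to a2a_client
--             return "a2a_client"
--
--     # Fall back to tester so the validation stage still runs, even when all
--     # implementation tasks are marked completed.
--     return "tester"
-- ===== SOURCE B (Python) =====
-- from typing import Dict, List, Optional
--
-- AGENT_EXECUTION_ORDER: List[str] = [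
--     "software_architect",
--     "coder",
--     "tester",
-- ]
--
-- INTERNAL_AGENTS = ["planner", "orchestrator", "error_recovery", "a2a_client"] + AGENT_EXECUTION_ORDER
--
--
-- def determine_next_agent(
--     tasks: List[Dict[str, str]],
--     prefer_agent: Optional[str] = None,
-- ) -> str:
--     # Reformulate the staged priority checks as a numeric ranking and take the
--     # minimum rank over the pending tasks in a single pass, then decode it.
--     def rank(name):
--         if prefer_agent and name == prefer_agent:
--             return 0
--         if name == "software_architect":
--             return 1
--         if name == "coder":
--             return 2
--         if name == "tester":
--             return 3
--         if name and name not in INTERNAL_AGENTS: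
--             return 4
--         return 5  # idle assignee: no influence on the choice
--
--     best = 5
--     for task in tasks:
--         if task.get("status") in ("pending", "in_progress"):
--             r = rank(task.get("assignedTo", ""))
--             if r < best:
--                 best = r
--     return [prefer_agent, "software_architect", "coder", "tester",
--             "a2a_client", "tester"][best]
-- ===== Notes on version B (the rewrite author's own statement) =====
-- stated objective: alternative
-- what changed: A decides by a cascade of separate any()/for scans over the pending-task list in priority order; B reformulates the priority cascade as a numeric rank per assignee, computes the minimum rank in a single pass over the tasks, and decodes that minimum by indexing a result table.
import Mathlib
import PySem

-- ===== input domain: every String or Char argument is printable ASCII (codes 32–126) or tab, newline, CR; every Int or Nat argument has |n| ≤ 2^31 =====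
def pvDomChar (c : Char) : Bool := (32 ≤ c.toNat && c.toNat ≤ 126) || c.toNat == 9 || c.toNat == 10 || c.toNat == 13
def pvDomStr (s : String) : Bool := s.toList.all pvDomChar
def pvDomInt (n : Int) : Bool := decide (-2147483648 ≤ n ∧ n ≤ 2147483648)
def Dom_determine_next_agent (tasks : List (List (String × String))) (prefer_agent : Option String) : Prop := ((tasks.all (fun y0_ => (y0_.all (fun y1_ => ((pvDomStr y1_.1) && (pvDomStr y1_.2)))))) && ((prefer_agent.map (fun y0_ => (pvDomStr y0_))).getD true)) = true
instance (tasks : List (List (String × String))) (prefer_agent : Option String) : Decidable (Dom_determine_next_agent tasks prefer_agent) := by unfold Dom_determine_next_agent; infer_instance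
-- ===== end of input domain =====

-- B replaces A's staged scans by one pass computing the minimum of a numeric priority rank
-- over the pending tasks, then decoding that rank (objective: alternative algorithm).


-- shared module-level constants and dict lookup
def pvAGENT_EXECUTION_ORDER : List String := ["software_architect", "coder", "tester"]
def pvINTERNAL_AGENTS : List String :=
  ["planner", "orchestrator", "error_recovery", "a2a_client"] ++ pvAGENT_EXECUTION_ORDER
def pvGet (t : List (String × String)) (k : String) : Option String := (PySem.Dict.mk t).get? k
def pvIsPendingStatus (t : List (String × String)) : Bool :=
  (pvGet t "status" == some "pending") || (pvGet t "status" == some "in_progress")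

-- ===== PORT A =====
def determine_next_agent (tasks : List (List (String × String))) (prefer_agent : Option String) : String :=
  let pending := tasks.filter pvIsPendingStatus
  let preferHit : Bool :=
    match prefer_agent with
    | some p => (p != "") && pending.any (fun t => pvGet t "assignedTo" == some p)
    | none => false
  if preferHit then prefer_agent.getD "" else
  match pvAGENT_EXECUTION_ORDER.find? (fun agent => pending.any (fun t => pvGet t "assignedTo" == some agent)) with
  | some agent => agent
  | none =>
    -- the for-loop returns the constant "a2a_client" on the first hit, i.e. iff some pending task matches
    if pending.any (fun t =>
        let assigned_to := (pvGet t "assignedTo").getD ""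
        (assigned_to != "") && !(pvINTERNAL_AGENTS.contains assigned_to))
    then "a2a_client" else "tester"

-- ===== PORT B =====
-- `prefer_agent and name == prefer_agent` (truthiness of the optional string)
def pvPM (prefer_agent : Option String) (name : String) : Bool :=
  match prefer_agent with
  | some p => (p != "") && (name == p)
  | none => false

def pvRank (prefer_agent : Option String) (name : String) : Nat :=
  if pvPM prefer_agent name then 0
  else if name == "software_architect" then 1
  else if name == "coder" then 2
  else if name == "tester" then 3
  else if (name != "") && !(pvINTERNAL_AGENTS.contains name) then 4
  else 5

def determine_next_agent_alt (tasks : List (List (String × String))) (prefer_agent : Option String) : String :=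
  let best : Nat := tasks.foldl (fun b t =>
    if pvIsPendingStatus t then
      let r := pvRank prefer_agent ((pvGet t "assignedTo").getD "")
      if r < b then r else b
    else b) 5
  -- the Python indexes a 6-element list with best ∈ [0,5]: always in range, so getD is exact;
  -- index 0 (the None slot) is reached only when prefer_agent is a nonempty string
  ([prefer_agent.getD "", "software_architect", "coder", "tester", "a2a_client", "tester"].getD best "tester")

-- ===== PRECONDITION & SPEC =====
def Spec_determine_next_agent (tasks : List (List (String × String))) (prefer_agent : Option String) (out : String) : Prop := out = determine_next_agent_alt tasks prefer_agent
instance (tasks : List (List (String × String))) (prefer_agent : Option String) (out : String) : Decidable (Spec_determine_next_agent tasks prefer_agent out) := by unfold Spec_determine_next_agent; infer_instance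

-- ===== CLAIM (what is proved, stated in full; the proofs are below) =====
def Claim_equal_determine_next_agent : Prop := ∀ (tasks : List (List (String × String))) (prefer_agent : Option String), Dom_determine_next_agent tasks prefer_agent → Spec_determine_next_agent tasks prefer_agent (determine_next_agent tasks prefer_agent)

-- ===== LEMMAS AND PROOFS =====

-- the pending assignee names, in order
def pvNames (tasks : List (List (String × String))) : List String :=
  (tasks.filter pvIsPendingStatus).map (fun t => (pvGet t "assignedTo").getD "")

-- B's fold over all tasks equals a min-fold over the pending names
theorem pvBest_eq (prefer_agent : Option String) (tasks : List (List (String × String))) (a : Nat) :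
    tasks.foldl (fun b t =>
      if pvIsPendingStatus t then
        let r := pvRank prefer_agent ((pvGet t "assignedTo").getD "")
        if r < b then r else b
      else b) a
    = (pvNames tasks).foldl (fun b n => min b (pvRank prefer_agent n)) a := by
  induction tasks generalizing a with
  | nil => rfl
  | cons t ts ih =>
    simp only [List.foldl_cons]
    by_cases h : pvIsPendingStatus t = true
    · rw [if_pos h, ih]
      have hN : pvNames (t :: ts) = ((pvGet t "assignedTo").getD "") :: pvNames ts := by
        simp [pvNames, h]
      rw [hN, List.foldl_cons]
      congr 1
      simp only [Nat.min_def]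
      split_ifs <;> omega
    · rw [if_neg h, ih]
      have hN : pvNames (t :: ts) = pvNames ts := by simp [pvNames, h]
      rw [hN]

theorem pvFoldMin_le (f : String → Nat) (l : List String) (a k : Nat) :
    (l.foldl (fun b n => min b (f n)) a ≤ k) ↔ (a ≤ k ∨ ∃ n ∈ l, f n ≤ k) := by
  induction l generalizing a with
  | nil => simp
  | cons x xs ih =>
    simp only [List.foldl_cons, ih, List.mem_cons]
    constructor
    · rintro (h | ⟨n, hn, hf⟩)
      · rcases min_le_iff.mp h with h' | h'
        · exact Or.inl h'
        · exact Or.inr ⟨x, Or.inl rfl, h'⟩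
      · exact Or.inr ⟨n, Or.inr hn, hf⟩
    · rintro (h | ⟨n, hn, hf⟩)
      · exact Or.inl (le_trans (Nat.min_le_left _ _) h)
      · rcases hn with rfl | hn
        · exact Or.inl (le_trans (Nat.min_le_right _ _) hf)
        · exact Or.inr ⟨n, hn, hf⟩

-- the min-fold written as the nested-if selection
theorem pvBest_ite (f : String → Nat) (l : List String) :
    l.foldl (fun b n => min b (f n)) 5
    = (if l.any (fun n => f n ≤ 0) then 0
       else if l.any (fun n => f n ≤ 1) then 1
       else if l.any (fun n => f n ≤ 2) then 2
       else if l.any (fun n => f n ≤ 3) then 3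
       else if l.any (fun n => f n ≤ 4) then 4
       else 5) := by
  have hex : ∀ k : Nat, (l.any (fun n => decide (f n ≤ k)) = true) ↔ ∃ n ∈ l, f n ≤ k := by
    intro k; simp
  have hle : ∀ k : Nat, (l.foldl (fun b n => min b (f n)) 5 ≤ k) ↔ (5 ≤ k ∨ ∃ n ∈ l, f n ≤ k) :=
    fun k => pvFoldMin_le f l 5 k
  split_ifs with h0 h1 h2 h3 h4
  · exact le_antisymm ((hle 0).2 (Or.inr ((hex 0).1 h0))) (Nat.zero_le _)
  · have hu := (hle 1).2 (Or.inr ((hex 1).1 h1))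
    have hlo : ¬ (l.foldl (fun b n => min b (f n)) 5 ≤ 0) := by
      intro hc
      rcases (hle 0).1 hc with h | h
      · omega
      · exact h0 ((hex 0).2 h)
    omega
  · have hu := (hle 2).2 (Or.inr ((hex 2).1 h2))
    have hlo : ¬ (l.foldl (fun b n => min b (f n)) 5 ≤ 1) := by
      intro hc
      rcases (hle 1).1 hc with h | h
      · omega
      · exact h1 ((hex 1).2 h)
    omega
  · have hu := (hle 3).2 (Or.inr ((hex 3).1 h3))
    have hlo : ¬ (l.foldl (fun b n => min b (f n)) 5 ≤ 2) := by
      intro hc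
      rcases (hle 2).1 hc with h | h
      · omega
      · exact h2 ((hex 2).2 h)
    omega
  · have hu := (hle 4).2 (Or.inr ((hex 4).1 h4))
    have hlo : ¬ (l.foldl (fun b n => min b (f n)) 5 ≤ 3) := by
      intro hc
      rcases (hle 3).1 hc with h | h
      · omega
      · exact h3 ((hex 3).2 h)
    omega
  · have hu := (hle 5).2 (Or.inl le_rfl)
    have hlo : ¬ (l.foldl (fun b n => min b (f n)) 5 ≤ 4) := by
      intro hc
      rcases (hle 4).1 hc with h | h
      · omega
      · exact h4 ((hex 4).2 h)
    omega

-- rank characterizations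
theorem pvRank_le0 (pa : Option String) (n : String) :
    decide (pvRank pa n ≤ 0) = pvPM pa n := by
  unfold pvRank; split_ifs <;> simp_all

theorem pvRank_le1 (pa : Option String) (n : String) :
    decide (pvRank pa n ≤ 1) = (pvPM pa n || n == "software_architect") := by
  unfold pvRank; split_ifs <;> simp_all

theorem pvRank_le2 (pa : Option String) (n : String) :
    decide (pvRank pa n ≤ 2) = (pvPM pa n || n == "software_architect" || n == "coder") := by
  unfold pvRank; split_ifs <;> simp_all

theorem pvRank_le3 (pa : Option String) (n : String) :
    decide (pvRank pa n ≤ 3) = (pvPM pa n || n == "software_architect" || n == "coder" || n == "tester") := by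
  unfold pvRank; split_ifs <;> simp_all

theorem pvRank_le4 (pa : Option String) (n : String) :
    decide (pvRank pa n ≤ 4) = (pvPM pa n || n == "software_architect" || n == "coder" || n == "tester" || ((n != "") && !(pvINTERNAL_AGENTS.contains n))) := by
  unfold pvRank; split_ifs <;> simp_all

-- any distributes over ||
theorem pvAny_or (l : List String) (f g : String → Bool) :
    l.any (fun n => f n || g n) = (l.any f || l.any g) := by
  induction l with
  | nil => rfl
  | cons x xs ih =>
    simp [List.any_cons, ih, Bool.or_assoc, Bool.or_left_comm]

-- A's assignedTo scan over pending equals a scan over the names, for a nonempty target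
theorem pvAny_assigned (tasks : List (List (String × String))) (a : String) (ha : a ≠ "") :
    (tasks.filter pvIsPendingStatus).any (fun t => pvGet t "assignedTo" == some a)
    = (pvNames tasks).any (fun n => n == a) := by
  unfold pvNames
  rw [List.any_map]
  induction tasks.filter pvIsPendingStatus with
  | nil => rfl
  | cons t ts ih =>
    simp only [List.any_cons, ih]
    congr 1
    cases hg : pvGet t "assignedTo" with
    | none =>
      have hne : ("" == a) = false := by
        simpa [beq_eq_false_iff_ne] using (Ne.symm ha)
      simp [Function.comp, hg, hne]
    | some x => simp [Function.comp, hg]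

theorem pvAny_ext (tasks : List (List (String × String))) :
    (tasks.filter pvIsPendingStatus).any (fun t =>
        let assigned_to := (pvGet t "assignedTo").getD ""
        (assigned_to != "") && !(pvINTERNAL_AGENTS.contains assigned_to))
    = (pvNames tasks).any (fun n => (n != "") && !(pvINTERNAL_AGENTS.contains n)) := by
  unfold pvNames
  rw [List.any_map]
  rfl

-- Bool-position bridges: an assignedTo scan as a decidable membership / existence test
theorem pvAny_beq_mem (l : List String) (a : String) :
    (l.any fun n => n == a) = decide (a ∈ l) := by
  rw [Bool.eq_iff_iff]
  simp only [List.any_eq_true, beq_iff_eq, decide_eq_true_eq]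
  constructor
  · rintro ⟨n, hn, rfl⟩; exact hn
  · intro h; exact ⟨a, h, rfl⟩

-- ===== VERDICT (by name: the statement is the Claim_ definition above) =====
theorem determine_next_agent_spec : Claim_equal_determine_next_agent := by
  intro tasks pa _dom
  unfold Spec_determine_next_agent determine_next_agent determine_next_agent_alt
  rw [pvBest_eq, pvBest_ite]
  simp only [pvRank_le0, pvRank_le1, pvRank_le2, pvRank_le3, pvRank_le4, pvAny_or,
    pvAGENT_EXECUTION_ORDER, List.find?, pvAny_ext,
    pvAny_assigned tasks "software_architect" (by decide),
    pvAny_assigned tasks "coder" (by decide),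
    pvAny_assigned tasks "tester" (by decide)]
  cases pa with
  | none =>
    simp only [pvPM, Option.getD]
    by_cases h1 : "software_architect" ∈ pvNames tasks <;>
    by_cases h2 : "coder" ∈ pvNames tasks <;>
    by_cases h3 : "tester" ∈ pvNames tasks <;>
    by_cases h4 : ∃ x ∈ pvNames tasks, ¬x = "" ∧ x ∉ pvINTERNAL_AGENTS <;>
    simp [h1, h2, h3, h4, pvPM, pvAny_beq_mem]
  | some p =>
    by_cases hp : p = ""
    · subst hp
      simp only [pvPM, Option.getD]
      by_cases h1 : "software_architect" ∈ pvNames tasks <;>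
      by_cases h2 : "coder" ∈ pvNames tasks <;>
      by_cases h3 : "tester" ∈ pvNames tasks <;>
      by_cases h4 : ∃ x ∈ pvNames tasks, ¬x = "" ∧ x ∉ pvINTERNAL_AGENTS <;>
      simp [h1, h2, h3, h4, pvPM, pvAny_beq_mem]
    · have hpb : (p != "") = true := by simpa using hp
      simp only [pvPM, hpb, Bool.true_and, Option.getD]
      rw [pvAny_assigned tasks p hp]
      by_cases h0 : p ∈ pvNames tasks <;>
      by_cases h1 : "software_architect" ∈ pvNames tasks <;>
      by_cases h2 : "coder" ∈ pvNames tasks <;>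
      by_cases h3 : "tester" ∈ pvNames tasks <;>
      by_cases h4 : ∃ x ∈ pvNames tasks, ¬x = "" ∧ x ∉ pvINTERNAL_AGENTS <;>
      simp [h0, h1, h2, h3, h4, pvPM, hpb, pvAny_beq_mem]
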